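-- pv_equiv track=rewrite | github.com/cannedtomatoes/ProjectEuler | euler65.py | gen_e
-- ===== SOURCE A (Python) =====
-- def gen_e(n):
-- 	#generates coefficients of continued fraction for e, with count n
-- 	k = 1
-- 	count = 0
-- 	output = [2]
--
-- 	while count < n:
-- 		output.append(1)
-- 		output.append(2*k)
-- 		output.append(1)
--
-- 		k += 1
-- 		count += 1
--
-- 	return output
-- ===== SOURCE B (Python) =====
-- def gen_e(n):
--     # one flat pass: position i (1-based after the leading 2) holds 2*(i//3+1)
--     # at every i with i % 3 == 2, and 1 elsewhere
--     return [2] + [2 * (i // 3 + 1) if i % 3 == 2 else 1 for i in range(1, 3 * n + 1)]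
-- ===== Notes on version B (the rewrite author's own statement) =====
-- stated objective: alternative
-- what changed: Replaces the while-loop that appends a triple of coefficients per step while incrementing a multiplier and a counter with a single flat comprehension over all output positions, computing each element from its index by a modular-arithmetic closed form.
import Mathlib
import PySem

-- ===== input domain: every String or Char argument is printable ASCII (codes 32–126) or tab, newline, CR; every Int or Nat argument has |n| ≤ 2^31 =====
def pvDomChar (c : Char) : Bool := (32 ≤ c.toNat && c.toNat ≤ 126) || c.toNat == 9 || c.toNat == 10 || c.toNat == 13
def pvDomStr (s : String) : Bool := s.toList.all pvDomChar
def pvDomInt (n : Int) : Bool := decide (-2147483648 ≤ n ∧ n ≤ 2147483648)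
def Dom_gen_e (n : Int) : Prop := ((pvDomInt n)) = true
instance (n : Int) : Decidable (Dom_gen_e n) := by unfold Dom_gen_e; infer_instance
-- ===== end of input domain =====

-- B replaces A's triple-appending while loop by one flat pass with a positional
-- closed form per output index; same O(n) cost (objective: alternative).

-- ===== PORT A =====
def gen_e_loop (n k count : Int) (output : List Int) : List Int :=
  if count < n then
    gen_e_loop n (k + 1) (count + 1) (output ++ [1, 2 * k, 1])
  else output
termination_by (n - count).toNat
decreasing_by omega

def gen_e (n : Int) : List Int := gen_e_loop n 1 0 [2]

-- ===== PORT B =====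
def gen_e_alt (n : Int) : List Int :=
  2 :: (PySem.List.pyRange 1 (3 * n + 1) 1).map
    (fun i => if PySem.Int.mod i 3 = 2 then 2 * (PySem.Int.floordiv i 3 + 1) else 1)

-- ===== PRECONDITION & SPEC =====
def Spec_gen_e (n : Int) (out : List Int) : Prop := out = gen_e_alt n
instance (n : Int) (out : List Int) : Decidable (Spec_gen_e n out) := by unfold Spec_gen_e; infer_instance

-- ===== CLAIM (what is proved, stated in full; the proofs are below) =====
def Claim_equal_gen_e : Prop := ∀ (n : Int), Dom_gen_e n → Spec_gen_e n (gen_e n)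

-- ===== LEMMAS AND PROOFS =====

-- the common tail: m remaining triples starting at multiplier k
def pvT : Nat → Int → List Int
  | 0, _ => []
  | m + 1, k => 1 :: 2 * k :: 1 :: pvT m (k + 1)

theorem gen_e_loop_eq (m : Nat) : ∀ (n k count : Int) (out : List Int),
    (n - count).toNat = m → gen_e_loop n k count out = out ++ pvT m k := by
  induction m with
  | zero =>
    intro n k count out h
    unfold gen_e_loop
    rw [if_neg (by omega)]
    simp [pvT]
  | succ m ih =>
    intro n k count out h
    unfold gen_e_loop
    rw [if_pos (by omega)]
    rw [ih n (k + 1) (count + 1) _ (by omega)]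
    simp [pvT]

theorem map_pyRange_eq_pvT (m : Nat) : ∀ (k : Int), 0 ≤ k →
    (PySem.List.pyRange (3 * k + 1) (3 * k + 3 * m + 1) 1).map
      (fun i => if PySem.Int.mod i 3 = 2 then 2 * (PySem.Int.floordiv i 3 + 1) else 1)
      = pvT m (k + 1) := by
  induction m with
  | zero =>
    intro k _
    rw [PySem.List.pyRange_one_eq_nil (by omega)]
    simp [pvT]
  | succ m ih =>
    intro k hk
    rw [PySem.List.pyRange_one_cons (by omega)]
    rw [PySem.List.pyRange_one_cons (by omega)]
    rw [PySem.List.pyRange_one_cons (by omega)]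
    simp only [List.map_cons]
    have h1 : PySem.Int.mod (3 * k + 1) 3 = 1 := by
      rw [PySem.Int.mod_eq_emod_of_pos (by omega)]; omega
    have h2 : PySem.Int.mod (3 * k + 1 + 1) 3 = 2 := by
      rw [PySem.Int.mod_eq_emod_of_pos (by omega)]; omega
    have h3 : PySem.Int.mod (3 * k + 1 + 1 + 1) 3 = 0 := by
      rw [PySem.Int.mod_eq_emod_of_pos (by omega)]; omega
    have h4 : PySem.Int.floordiv (3 * k + 1 + 1) 3 = k := by
      rw [PySem.Int.floordiv_eq_ediv_of_pos (by omega)]; omega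
    rw [h1, h2, h3, h4]
    have hrange : (3 * k + 1 + 1 + 1 + 1 : Int) = 3 * (k + 1) + 1 := by ring
    have hrange2 : (3 * k + 3 * (m + 1 : Nat) + 1 : Int) = 3 * (k + 1) + 3 * m + 1 := by
      push_cast; ring
    rw [hrange, hrange2, ih (k + 1) (by omega)]
    simp [pvT]

-- ===== VERDICT (by name: the statement is the Claim_ definition above) =====
theorem gen_e_spec : Claim_equal_gen_e := by
  intro n _
  unfold Spec_gen_e gen_e gen_e_alt
  rw [gen_e_loop_eq n.toNat n 1 0 [2] (by omega)]
  by_cases hn : n ≤ 0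
  · rw [PySem.List.pyRange_one_eq_nil (by omega)]
    have : n.toNat = 0 := by omega
    simp [this, pvT]
  · have hm := map_pyRange_eq_pvT n.toNat 0 le_rfl
    have hcast : ((n.toNat : Int)) = n := by omega
    norm_num [hcast] at hm
    simp [hm]
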